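-- pv_equiv track=rewrite | github.com/t1seo/ps_study | tseo/Programmers/level1/12930_이상한 문자 만들기-1.py | solution
-- ===== SOURCE A (Python) =====
-- def solution(s):
--     def converter(word):
--         """
--         한 단어를 다음과 같이 바꿔준다
--             짝수->대문자
--             홀수->소문자
--         """
--         char_list = list(word)
--         for i, c in enumerate(char_list):
--             if i % 2 == 0:
--                 char_list[i] = c.upper()
--             else:
--                 char_list[i] = c.lower()
--         return "".join(char_list)
--
--     words = s.split(" ")
--     # result = []
--     result = list(map(converter, words))
--
--     # for word in words:
--     #     result.append(converter(word))
--
--     return " ".join(result)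
-- ===== SOURCE B (Python) =====
-- def solution(s):
--     out = []
--     i = 0
--     for c in s:
--         if c == ' ':
--             out.append(c)
--             i = 0
--         else:
--             out.append(c.upper() if i % 2 == 0 else c.lower())
--             i += 1
--     return ''.join(out)
-- ===== Notes on version B (the rewrite author's own statement) =====
-- stated objective: simpler
-- what changed: Replaces the split-on-space / per-word converter / join pipeline with a single pass over the characters that keeps an in-word index reset at every space.
import Mathlib
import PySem

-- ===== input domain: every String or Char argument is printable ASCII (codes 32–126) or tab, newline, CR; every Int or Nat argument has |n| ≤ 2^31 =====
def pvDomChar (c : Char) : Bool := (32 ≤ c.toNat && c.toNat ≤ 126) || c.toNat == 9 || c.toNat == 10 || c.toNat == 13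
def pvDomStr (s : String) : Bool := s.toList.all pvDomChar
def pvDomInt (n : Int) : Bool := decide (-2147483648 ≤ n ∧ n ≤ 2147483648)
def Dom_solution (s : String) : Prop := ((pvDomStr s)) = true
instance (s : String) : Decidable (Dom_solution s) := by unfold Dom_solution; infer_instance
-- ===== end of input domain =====

-- B replaces A's split/convert-each-word/join pipeline by one scan over the characters
-- with an in-word index that resets at every space (objective: simpler decomposition).

-- ===== PORT A =====
-- converter(word): char at even index → upper, odd → lower (A writes each position of
-- char_list over enumerate; ported as the map over enumerate producing those values)
def solutionConverter (word : List Char) : List Char :=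
  (PySem.List.enumerate word 0).map (fun ic =>
    if PySem.Int.mod ic.1 2 = 0 then PySem.Chars.upperChar ic.2 else PySem.Chars.lowerChar ic.2)

def solution (s : String) : String :=
  String.ofList (PySem.Chars.join [' '] ((PySem.Chars.splitOn s.toList [' ']).map solutionConverter))

-- ===== PORT B =====
def solution_alt (s : String) : String :=
  String.ofList (s.toList.foldl
    (fun (st : List Char × Nat) c =>
      if c = ' ' then (st.1 ++ [c], 0)
      else (st.1 ++ [if st.2 % 2 = 0 then PySem.Chars.upperChar c else PySem.Chars.lowerChar c],
            st.2 + 1))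
    ([], 0)).1

-- ===== PRECONDITION & SPEC =====
def Spec_solution (s : String) (out : String) : Prop := out = solution_alt s
instance (s : String) (out : String) : Decidable (Spec_solution s out) := by unfold Spec_solution; infer_instance

-- ===== CLAIM (what is proved, stated in full; the proofs are below) =====
def Claim_equal_solution : Prop := ∀ (s : String), Dom_solution s → Spec_solution s (solution s)

-- ===== LEMMAS AND PROOFS =====

-- transform one character at in-word index k
def trN (k : Nat) (c : Char) : Char :=
  if k % 2 = 0 then PySem.Chars.upperChar c else PySem.Chars.lowerChar c

-- converter starting at in-word index k
def convN (k : Nat) : List Char → List Char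
  | [] => []
  | c :: w => trN k c :: convN (k + 1) w

-- structural characterisation of splitOn on the single-char separator ' '
def split1 : List Char → List (List Char)
  | [] => [[]]
  | c :: cs => if c = ' ' then [] :: split1 cs else (split1 cs).modifyHead (c :: ·)

-- B's scan, as a structural recursion
def proc : List Char → Nat → List Char
  | [], _ => []
  | c :: cs, k => if c = ' ' then ' ' :: proc cs 0 else trN k c :: proc cs (k + 1)

lemma foldB_eq_proc (cs : List Char) : ∀ (acc : List Char) (k : Nat),
    (cs.foldl
      (fun (st : List Char × Nat) c =>
        if c = ' ' then (st.1 ++ [c], 0)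
        else (st.1 ++ [if st.2 % 2 = 0 then PySem.Chars.upperChar c else PySem.Chars.lowerChar c],
              st.2 + 1))
      (acc, k)).1 = acc ++ proc cs k := by
  induction cs with
  | nil => intro acc k; simp [proc]
  | cons c cs ih =>
    intro acc k
    by_cases h : c = ' '
    · simp [h, proc, ih]
    · simp [h, proc, ih, trN]

lemma split1_ne_nil (cs : List Char) : split1 cs ≠ [] := by
  induction cs with
  | nil => simp [split1]
  | cons c cs ih =>
    by_cases h : c = ' '
    · simp [split1, h]
    · simp only [split1, h, if_false]
      cases hs : split1 cs with
      | nil => exact absurd hs ih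
      | cons w ws => simp

lemma go_eq_split1 (fuel : Nat) : ∀ (l cur : List Char) (acc : List (List Char)),
    l.length ≤ fuel →
    PySem.Chars.splitOn.go [' '] fuel l cur acc
      = acc.reverse ++ (split1 l).modifyHead (cur.reverse ++ ·) := by
  induction fuel with
  | zero =>
    intro l cur acc h
    have : l = [] := List.eq_nil_of_length_eq_zero (Nat.le_zero.mp h)
    subst this
    simp [PySem.Chars.splitOn.go, split1]
  | succ fuel ih =>
    intro l cur acc h
    cases l with
    | nil => simp [PySem.Chars.splitOn.go, split1]
    | cons c rest =>
      by_cases hc : c = ' '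
      · subst hc
        have : PySem.Chars.splitOn.go [' '] (fuel+1) (' ' :: rest) cur acc
            = PySem.Chars.splitOn.go [' '] fuel rest [] (cur.reverse :: acc) := by
          simp [PySem.Chars.splitOn.go, List.isPrefixOf]
        rw [this, ih rest [] (cur.reverse :: acc) (by simpa using Nat.lt_succ_iff.mp (by simpa using h))]
        simp only [split1, if_true, List.reverse_cons]
        cases hs : split1 rest with
        | nil => exact absurd hs (split1_ne_nil rest)
        | cons w ws => simp
      · have : PySem.Chars.splitOn.go [' '] (fuel+1) (c :: rest) cur acc
            = PySem.Chars.splitOn.go [' '] fuel rest (c :: cur) acc := by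
          simp only [PySem.Chars.splitOn.go, List.isPrefixOf, Bool.and_eq_true, beq_iff_eq]
          rw [if_neg (by simp [Ne.symm hc])]
        rw [this, ih rest (c :: cur) acc (by simpa using Nat.lt_succ_iff.mp (by simpa using h))]
        simp only [split1, hc, if_false, List.reverse_cons]
        cases hs : split1 rest with
        | nil => exact absurd hs (split1_ne_nil rest)
        | cons w ws => simp

lemma splitOn_eq_split1 (cs : List Char) :
    PySem.Chars.splitOn cs [' '] = split1 cs := by
  rw [PySem.Chars.splitOn, go_eq_split1 (cs.length + 1) cs [] [] (by omega)]
  cases hs : split1 cs with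
  | nil => exact absurd hs (split1_ne_nil cs)
  | cons w ws => simp

lemma enumerate_map_eq_convN (w : List Char) : ∀ (k : Nat),
    (PySem.List.enumerate w (k : Int)).map (fun ic =>
      if PySem.Int.mod ic.1 2 = 0 then PySem.Chars.upperChar ic.2 else PySem.Chars.lowerChar ic.2)
      = convN k w := by
  induction w with
  | nil => intro k; simp [convN]
  | cons c w ih =>
    intro k
    rw [PySem.List.enumerate_cons]
    have hk1 : ((k : Int) + 1) = ((k + 1 : Nat) : Int) := by push_cast; ring
    have hmod : PySem.Int.mod (k : Int) 2 = ((k % 2 : Nat) : Int) :=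
      PySem.Int.mod_natCast k 2
    simp only [List.map_cons, hk1, ih, convN, trN, hmod]
    by_cases h : k % 2 = 0
    · simp [h]
    · simp only [h, if_false]
      simp only [List.cons.injEq, and_true]
      simp
      intro hd
      exfalso
      omega

lemma converter_eq_convN (w : List Char) : solutionConverter w = convN 0 w := by
  have := enumerate_map_eq_convN w 0
  simpa [solutionConverter] using this

lemma proc_eq_words (cs : List Char) : ∀ (k : Nat) (w : List Char) (ws : List (List Char)),
    split1 cs = w :: ws →
    proc cs k = convN k w ++ ws.flatMap (fun v => ' ' :: convN 0 v) := by
  induction cs with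
  | nil =>
    intro k w ws h
    simp [split1] at h
    obtain ⟨h1, h2⟩ := h
    subst h1; subst h2
    simp [proc, convN]
  | cons c cs ih =>
    intro k w ws h
    by_cases hc : c = ' '
    · subst hc
      simp only [split1, if_true] at h
      injection h with h1 h2
      subst h1; subst h2
      cases hs : split1 cs with
      | nil => exact absurd hs (split1_ne_nil cs)
      | cons w' ws' =>
        simp only [proc, if_true, convN, List.flatMap_cons]
        rw [ih 0 w' ws' hs]
        simp
    · simp only [split1, hc, if_false] at h
      cases hs : split1 cs with
      | nil => exact absurd hs (split1_ne_nil cs)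
      | cons w' ws' =>
        rw [hs] at h
        simp only [List.modifyHead_cons] at h
        injection h with h1 h2
        subst h1; subst h2
        simp only [proc, hc, if_false, convN]
        rw [ih (k + 1) w' ws' hs]
        simp

lemma join_map_convN (ws : List (List Char)) : ∀ (w : List Char),
    PySem.Chars.join [' '] ((w :: ws).map (convN 0))
      = convN 0 w ++ ws.flatMap (fun v => ' ' :: convN 0 v) := by
  induction ws with
  | nil => intro w; simp [PySem.Chars.join_singleton]
  | cons w' ws ih =>
    intro w
    simp only [List.map_cons] at ih ⊢
    rw [PySem.Chars.join_cons_cons, ih w']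
    simp

-- ===== VERDICT (by name: the statement is the Claim_ definition above) =====
theorem solution_spec : Claim_equal_solution := by
  intro s _
  unfold Spec_solution solution solution_alt
  rw [foldB_eq_proc s.toList [] 0]
  rw [splitOn_eq_split1]
  cases hs : split1 s.toList with
  | nil => exact absurd hs (split1_ne_nil s.toList)
  | cons w ws =>
    rw [proc_eq_words s.toList 0 w ws hs]
    have hmap : (w :: ws).map (solutionConverter) = (w :: ws).map (convN 0) :=
      List.map_congr_left (fun x _ => converter_eq_convN x)
    simp only [List.map_cons] at hmap ⊢
    rw [hmap]
    have hj := join_map_convN ws w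
    simp only [List.map_cons] at hj
    rw [hj]
    simp
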